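-- pv_equiv track=rewrite | github.com/atbPy/GameOfLife | game.py | board_to_display
-- ===== SOURCE A (Python) =====
-- from collections import namedtuple, Counter
--
-- Cell = namedtuple('Cell', ['x', 'y'])
--
-- WHITE_SPACE = u"\u25A1"
--
-- FILLED_SPACE = u"\u25A0"
--
-- NEW_LINE = '\n'
--
-- def board_to_display(board, column, row):
--     """
--     Makes a string for display on the console
--     :param board: set with named tuples
--     :param column: positive integer
--     :param row: positive integer
--     :return: string with whitespace stripped
--     """
--     board_string = ""
--
--     for y in range(row):
--         for x in range(column):
--             if Cell(x, y) in board: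
--                 board_string += FILLED_SPACE
--             else:
--                 board_string += WHITE_SPACE
--
--         board_string += NEW_LINE
--
--     return board_string.strip()
-- ===== SOURCE B (Python) =====
-- WHITE_SPACE = u"\u25A1"
-- FILLED_SPACE = u"\u25A0"
-- NEW_LINE = '\n'
--
-- def board_to_display(board, column, row):
--     rows = [[WHITE_SPACE] * column for _ in range(row)]
--     for c in board:
--         if 0 <= c[0] < column and 0 <= c[1] < row:
--             rows[c[1]][c[0]] = FILLED_SPACE
--     return NEW_LINE.join(''.join(r) for r in rows).strip()
-- ===== Notes on version B (the rewrite author's own statement) =====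
-- stated objective: alternative
-- what changed: Instead of scanning every grid position, testing set membership, and growing one string character by character, B allocates a blank grid, scatters only the in-range board cells onto it, and joins the rows with newlines before stripping.
import Mathlib
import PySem

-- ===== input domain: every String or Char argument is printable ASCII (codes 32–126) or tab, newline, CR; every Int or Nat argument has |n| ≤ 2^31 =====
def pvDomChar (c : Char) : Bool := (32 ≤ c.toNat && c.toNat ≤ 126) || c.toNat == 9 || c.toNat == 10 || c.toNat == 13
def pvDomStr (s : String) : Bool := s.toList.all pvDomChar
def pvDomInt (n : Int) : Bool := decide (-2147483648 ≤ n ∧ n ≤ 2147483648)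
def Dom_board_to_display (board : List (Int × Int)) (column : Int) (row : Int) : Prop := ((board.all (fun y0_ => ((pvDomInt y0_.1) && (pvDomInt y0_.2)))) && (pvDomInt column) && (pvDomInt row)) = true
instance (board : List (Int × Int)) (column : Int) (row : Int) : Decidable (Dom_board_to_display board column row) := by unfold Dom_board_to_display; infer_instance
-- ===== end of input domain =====

-- B replaces A's full row-by-row scan (a membership test at every grid position) by a
-- scatter pass: allocate a blank grid, mark only the in-range board cells, join the rows
-- (objective: alternative decomposition, same cost on a dense grid).

-- ===== PORT A =====
-- A: nested loops over range(row) × range(column), appending a filled/white square per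
-- position and a newline per row, then .strip() of the whole string.
def board_to_display (board : List (Int × Int)) (column : Int) (row : Int) : String :=
  PySem.Str.strip
    ((PySem.List.pyRange 0 row).foldl (fun bs y =>
      ((PySem.List.pyRange 0 column).foldl (fun bs2 x =>
        bs2 ++ (if board.contains (x, y) then "■" else "□")) bs) ++ "\n") "")

-- ===== PORT B =====
-- B: blank grid of rows, scatter the in-range board cells onto it, join with newlines, strip.
def board_to_display_alt (board : List (Int × Int)) (column : Int) (row : Int) : String :=
  let rows0 : List (List Char) := (List.range row.toNat).map (fun _ => List.replicate column.toNat '□')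
  let rows := board.foldl (fun g c =>
    if 0 ≤ c.1 ∧ c.1 < column ∧ 0 ≤ c.2 ∧ c.2 < row then
      g.set c.2.toNat ((g.getD c.2.toNat []).set c.1.toNat '■')
    else g) rows0
  PySem.Str.strip (PySem.Str.join "\n" (rows.map (fun r => String.ofList r)))

-- ===== PRECONDITION & SPEC =====
def Spec_board_to_display (board : List (Int × Int)) (column : Int) (row : Int) (out : String) : Prop := out = board_to_display_alt board column row
instance (board : List (Int × Int)) (column : Int) (row : Int) (out : String) : Decidable (Spec_board_to_display board column row out) := by unfold Spec_board_to_display; infer_instance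

-- ===== CLAIM (what is proved, stated in full; the proofs are below) =====
def Claim_equal_board_to_display : Prop := ∀ (board : List (Int × Int)) (column : Int) (row : Int), Dom_board_to_display board column row → Spec_board_to_display board column row (board_to_display board column row)

-- ===== LEMMAS AND PROOFS =====
def pvCellChar (board : List (Int × Int)) (x y : Int) : Char :=
  if board.contains (x, y) then '■' else '□'

def pvLine (board : List (Int × Int)) (column : Int) (y : Int) : List Char :=
  List.map (fun x : Nat => pvCellChar board (x : Int) y) (List.range column.toNat)

def pvLines (board : List (Int × Int)) (column row : Int) : List (List Char) :=
  List.map (fun y : Nat => pvLine board column (y : Int)) (List.range row.toNat)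

theorem pvPyRange0 (n : Int) : PySem.List.pyRange 0 n = List.map (fun k : Nat => (k : Int)) (List.range n.toNat) := by
  unfold PySem.List.pyRange
  by_cases h : (0:Int) < n
  · have h1 : ((n - 0 + 1 - 1) / 1).toNat = n.toNat := by omega
    simp only [if_neg one_ne_zero, if_pos h, h1]
    simp [← List.map_eq_flatMap]
  · have h1 : n.toNat = 0 := by omega
    simp [h, h1]

theorem pvFoldlStr {α : Type} (f : α → String) (l : List α) (acc : String) :
    (l.foldl (fun bs x => bs ++ f x) acc).toList = acc.toList ++ l.flatMap (fun x => (f x).toList) := by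
  induction l generalizing acc with
  | nil => simp
  | cons a t ih => simp [ih, String.toList_append]

theorem pvStrExt (s t : String) (h : s.toList = t.toList) : s = t := by
  have := congrArg String.ofList h
  simpa using this

theorem pvInner (board : List (Int × Int)) (column : Int) (y : Int) (bs : String) :
    (PySem.List.pyRange 0 column).foldl (fun bs2 x => bs2 ++ (if board.contains (x, y) then "■" else "□")) bs
    = bs ++ String.ofList (pvLine board column y) := by
  apply pvStrExt
  rw [pvFoldlStr, String.toList_append, String.toList_ofList]
  congr 1
  rw [pvPyRange0]
  rw [List.flatMap_map (fun k : Nat => (k:Int)) (fun x : Int => (if board.contains (x, y) = true then "■" else "□").toList) (List.range column.toNat)]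
  have hf : (fun a : Nat => (if board.contains ((a:Int), y) = true then "■" else "□").toList)
      = (fun a : Nat => [pvCellChar board (a:Int) y]) := by
    funext a; unfold pvCellChar; by_cases h : ((a:Int), y) ∈ board <;> simp [h]
  rw [hf, ← List.map_eq_flatMap, pvLine]

theorem pvA_toList (board : List (Int × Int)) (column row : Int) :
    ((PySem.List.pyRange 0 row).foldl (fun bs y =>
      ((PySem.List.pyRange 0 column).foldl (fun bs2 x =>
        bs2 ++ (if board.contains (x, y) then "■" else "□")) bs) ++ "\n") "").toList
    = (pvLines board column row).flatMap (fun l => l ++ ['\n']) := by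
  rw [PySem.List.foldl_congr_mem _ _ (fun bs y => bs ++ (String.ofList (pvLine board column y) ++ "\n")) _
    (by intro bs y _; rw [pvInner, String.append_assoc])]
  rw [pvFoldlStr, pvPyRange0]
  rw [List.flatMap_map (fun k : Nat => (k:Int)) (fun y : Int => ((String.ofList (pvLine board column y) ++ "\n") : String).toList) (List.range row.toNat)]
  rw [pvLines, List.flatMap_map]
  simp [String.toList_append, String.toList_ofList]

def pvIdx (g : List (List Char)) (y x : Nat) : Char := (g.getD y []).getD x '□'

theorem pvScatter (column row : Int) (cs : List (Int × Int)) :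
    ∀ (g : List (List Char)), g.length = row.toNat → (∀ r ∈ g, r.length = column.toNat) →
    (cs.foldl (fun g c =>
      if 0 ≤ c.1 ∧ c.1 < column ∧ 0 ≤ c.2 ∧ c.2 < row then
        g.set c.2.toNat ((g.getD c.2.toNat []).set c.1.toNat '■')
      else g) g).length = row.toNat ∧
    (∀ r ∈ (cs.foldl (fun g c =>
      if 0 ≤ c.1 ∧ c.1 < column ∧ 0 ≤ c.2 ∧ c.2 < row then
        g.set c.2.toNat ((g.getD c.2.toNat []).set c.1.toNat '■')
      else g) g), r.length = column.toNat) ∧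
    (∀ y x : Nat, y < row.toNat → x < column.toNat →
      pvIdx (cs.foldl (fun g c =>
        if 0 ≤ c.1 ∧ c.1 < column ∧ 0 ≤ c.2 ∧ c.2 < row then
          g.set c.2.toNat ((g.getD c.2.toNat []).set c.1.toNat '■')
        else g) g) y x = if ((x:Int),(y:Int)) ∈ cs then '■' else pvIdx g y x) := by
  induction cs with
  | nil => intro g hlen hrows; simpa using ⟨hlen, hrows⟩
  | cons c t ih =>
    intro g hlen hrows
    simp only [List.foldl_cons]
    by_cases hc : 0 ≤ c.1 ∧ c.1 < column ∧ 0 ≤ c.2 ∧ c.2 < row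
    · rw [if_pos hc]
      set g1 := g.set c.2.toNat ((g.getD c.2.toNat []).set c.1.toNat '■') with hg1
      have hy2 : c.2.toNat < g.length := by omega
      have hlen1 : g1.length = row.toNat := by simp [hg1, List.length_set, hlen]
      have hrows1 : ∀ r ∈ g1, r.length = column.toNat := by
        intro r hr
        rcases List.mem_or_eq_of_mem_set hr with h | h
        · exact hrows r h
        · subst h
          rw [List.length_set, List.getD_eq_getElem _ _ hy2]
          exact hrows _ (List.getElem_mem hy2)
      obtain ⟨h1, h2, h3⟩ := ih g1 hlen1 hrows1
      refine ⟨h1, h2, ?_⟩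
      intro y x hy hx
      rw [h3 y x hy hx]
      have hidx : pvIdx g1 y x = if c = ((x:Int),(y:Int)) then '■' else pvIdx g y x := by
        have hylen : y < g.length := by omega
        have hxlen : x < (g[c.2.toNat]).length := by
          rw [hrows _ (List.getElem_mem hy2)]; exact hx
        have houter : g1.getD y [] = if c.2.toNat = y then (g.getD c.2.toNat []).set c.1.toNat '■' else g.getD y [] := by
          rw [hg1, List.getD_eq_getElem _ _ (by simpa [List.length_set] using hylen), List.getElem_set]
          by_cases hyy : c.2.toNat = y
          · rw [if_pos hyy, if_pos hyy]
          · rw [if_neg hyy, if_neg hyy, List.getD_eq_getElem _ _ hylen]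
        unfold pvIdx
        rw [houter]
        by_cases hyy : c.2.toNat = y
        · rw [if_pos hyy]
          rw [List.getD_eq_getElem _ _ (show x < ((g.getD c.2.toNat []).set c.1.toNat '■').length by rw [List.length_set, List.getD_eq_getElem _ _ hy2]; exact hxlen), List.getElem_set]
          by_cases hxx : c.1.toNat = x
          · have hceq : c = ((x:Int),(y:Int)) := by
              obtain ⟨c1, c2⟩ := c
              simp only [Prod.mk.injEq]
              simp only at hc hxx hyy
              constructor <;> omega
            rw [if_pos hxx, if_pos hceq]
          · have hne : ¬ c = ((x:Int),(y:Int)) := by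
              intro h; apply hxx; rw [h]; omega
            rw [if_neg hxx, if_neg hne]
            subst hyy
            simp only [List.getD_eq_getElem _ _ hy2]
            exact (List.getD_eq_getElem _ _ hxlen).symm
        · have hne : ¬ c = ((x:Int),(y:Int)) := by
            intro h; apply hyy; rw [h]; omega
          rw [if_neg hyy, if_neg hne]
      rw [hidx]
      by_cases hmem : ((x:Int),(y:Int)) ∈ t
      · simp [hmem]
      · by_cases heq : c = ((x:Int),(y:Int)) <;> simp [hmem, heq, List.mem_cons]
        · exact fun h => absurd h.symm heq
    · rw [if_neg hc]
      obtain ⟨h1, h2, h3⟩ := ih g hlen hrows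
      refine ⟨h1, h2, ?_⟩
      intro y x hy hx
      rw [h3 y x hy hx]
      have hne : ¬ ((x:Int),(y:Int)) = c := by
        intro h
        apply hc
        obtain ⟨c1, c2⟩ := c
        obtain ⟨h1', h2'⟩ := Prod.mk.injEq .. ▸ h.symm
        refine ⟨by omega, by omega, by omega, by omega⟩
      simp [List.mem_cons, hne]

theorem pvRows0_len (column row : Int) :
    ((List.range row.toNat).map (fun _ => List.replicate column.toNat '□')).length = row.toNat := by
  simp

theorem pvRows0_rows (column row : Int) :
    ∀ r ∈ (List.range row.toNat).map (fun _ => List.replicate column.toNat '□'), r.length = column.toNat := by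
  intro r hr
  rcases List.mem_map.mp hr with ⟨a, _, rfl⟩
  simp

theorem pvGetD_replicate (n x : Nat) (c : Char) : (List.replicate n c).getD x c = c := by
  rcases lt_or_ge x n with h | h
  · rw [List.getD_eq_getElem _ _ (by simpa using h)]; simp
  · simp [List.getD, List.getElem?_eq_none ((List.length_replicate (n:=n)).symm ▸ h : (List.replicate n c).length ≤ x)]

theorem pvIdx_rows0 (column row : Int) (y x : Nat) (hy : y < row.toNat) :
    pvIdx ((List.range row.toNat).map (fun _ => List.replicate column.toNat '□')) y x = '□' := by
  unfold pvIdx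
  have h0 : ((List.range row.toNat).map (fun _ => List.replicate column.toNat '□')).getD y []
      = List.replicate column.toNat '□' := by
    rw [List.getD_eq_getElem _ _ (by simpa using hy)]
    simp
  rw [h0, pvGetD_replicate]

theorem pvRowsEq (board : List (Int × Int)) (column row : Int) :
    (board.foldl (fun g c =>
      if 0 ≤ c.1 ∧ c.1 < column ∧ 0 ≤ c.2 ∧ c.2 < row then
        g.set c.2.toNat ((g.getD c.2.toNat []).set c.1.toNat '■')
      else g) ((List.range row.toNat).map (fun _ => List.replicate column.toNat '□')))
    = pvLines board column row := by
  obtain ⟨h1, h2, h3⟩ := pvScatter column row board _ (pvRows0_len column row) (pvRows0_rows column row)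
  set F := board.foldl (fun g c =>
      if 0 ≤ c.1 ∧ c.1 < column ∧ 0 ≤ c.2 ∧ c.2 < row then
        g.set c.2.toNat ((g.getD c.2.toNat []).set c.1.toNat '■')
      else g) ((List.range row.toNat).map (fun _ => List.replicate column.toNat '□')) with hF
  apply List.ext_getElem
  · rw [h1]; simp [pvLines]
  · intro y hy1 hy2
    have hylt : y < row.toNat := by rwa [h1] at hy1
    apply List.ext_getElem
    · rw [h2 _ (List.getElem_mem hy1)]
      simp [pvLines, pvLine]
    · intro x hx1 hx2
      have hxlt : x < column.toNat := by
        have := h2 _ (List.getElem_mem hy1); omega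
      have hq := h3 y x hylt hxlt
      rw [pvIdx_rows0 column row y x hylt] at hq
      have hpv : pvIdx F y x = (F[y]'hy1)[x]'hx1 := by
        unfold pvIdx
        simp only [List.getD_eq_getElem _ _ hy1]
        simp only [List.getD_eq_getElem _ _ hx1]
      rw [hpv] at hq
      rw [hq]
      simp only [pvLines, pvLine, List.getElem_map, List.getElem_range, pvCellChar]
      by_cases hm : ((x:Int),(y:Int)) ∈ board <;> simp [hm]

theorem pvFlatMapJoin (t : List (List Char)) : ∀ l : List Char,
    (l :: t).flatMap (fun r => r ++ ['\n']) = PySem.Chars.join ['\n'] (l :: t) ++ ['\n'] := by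
  induction t with
  | nil => intro l; simp [PySem.Chars.join, List.intercalate]
  | cons m t ih =>
    intro l
    rw [List.flatMap_cons, ih m, PySem.Chars.join_cons_cons]
    simp

theorem pvRstripNl (x : List Char) : PySem.Chars.rstrip (x ++ ['\n']) = PySem.Chars.rstrip x := by
  unfold PySem.Chars.rstrip
  rw [List.reverse_append]
  simp only [List.reverse_cons, List.reverse_nil, List.nil_append, List.singleton_append]
  rw [List.dropWhile_cons_of_pos (by decide)]

theorem pvStripNl (x : List Char) : PySem.Chars.strip (x ++ ['\n']) = PySem.Chars.strip x := by
  unfold PySem.Chars.strip PySem.Chars.lstrip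
  rw [List.dropWhile_append]
  by_cases h : (List.dropWhile PySem.Chars.isspace x).isEmpty
  · rw [if_pos h]
    rw [List.isEmpty_iff] at h
    rw [h]
    rw [List.dropWhile_cons_of_pos (by decide)]
    simp
  · rw [if_neg h, pvRstripNl]

theorem pvStripFlat (ls : List (List Char)) :
    PySem.Chars.strip (ls.flatMap (fun r => r ++ ['\n'])) = PySem.Chars.strip (PySem.Chars.join ['\n'] ls) := by
  cases ls with
  | nil => simp [PySem.Chars.join, List.intercalate]
  | cons l t => rw [pvFlatMapJoin t l, pvStripNl]

-- ===== VERDICT (by name: the statement is the Claim_ definition above) =====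
theorem board_to_display_spec : Claim_equal_board_to_display := by
  intro board column row _
  unfold Spec_board_to_display board_to_display board_to_display_alt
  rw [PySem.Str.strip, PySem.Str.strip]
  rw [pvA_toList]
  congr 1
  rw [pvRowsEq]
  rw [PySem.Str.toList_join, List.map_map]
  have h : (String.toList ∘ fun r => String.ofList r) = id := by
    funext r; simp
  rw [h, List.map_id]
  rw [pvStripFlat]
  rfl
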